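-- pv_equiv track=rewrite | github.com/LiberTEM/LiberTEM | src/libertem/io/dataset/dask.py | min_with_min_neighbor
-- ===== SOURCE A (Python) =====
-- def findall(sequence, val):
--     return [idx for idx, e in enumerate(sequence) if e == val]
--
-- def neighbour_idxs(sequence, idx):
--     max_idx = len(sequence) - 1
--     if idx > 0 and idx < max_idx:
--         return (idx - 1, idx + 1)
--     elif idx == 0:
--         return (None, idx + 1)
--     elif idx == max_idx:
--         return (idx - 1, None)
--     else:
--         raise
--
-- def min_neighbour(sequence, idx):
--     left, right = neighbour_idxs(sequence, idx)
--     if left is None: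
--         return right
--     elif right is None:
--         return left
--     else:
--         return min([left, right], key=lambda x: sequence[x])
--
-- def min_with_min_neighbor(sequence):
--     min_val = min(sequence)
--     occurences = findall(sequence, min_val)
--     min_idx_pairs = [(idx, min_neighbour(sequence, idx)) for idx in occurences]
--     pair = [sum(get_values(sequence, idxs)) for idxs in min_idx_pairs]
--     min_pair = min(pair)
--     min_pair_occurences = findall(pair, min_pair)
--     return min_idx_pairs[min_pair_occurences[-1]]  # breaking ties from right
--
-- def get_values(sequence, idxs):
--     return [sequence[idx] for idx in idxs]
-- ===== SOURCE B (Python) =====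
-- def min_with_min_neighbor(sequence):
--     # Rank every index by the lexicographic key (value, pair_sum, -index) and let
--     # the builtin min pick the winner directly: the minimal value sorts first, then
--     # the smallest pair sum, and -index makes the rightmost tie win.
--     n = len(sequence)
--
--     def neighbour(i):
--         if i == 0:
--             return 1
--         if i == n - 1:
--             return i - 1
--         return i - 1 if sequence[i - 1] <= sequence[i + 1] else i + 1
--
--     best = min(range(n),
--                key=lambda i: (sequence[i],
--                               sequence[i] + sequence[neighbour(i)],
--                               -i))
--     return (best, neighbour(best))
-- ===== Notes on version B (the rewrite author's own statement) =====
-- stated objective: alternative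
-- what changed: Replaces A's staged pipeline (min value, findall of its occurrences, pair list, sum list, min of sums, findall of that and negative indexing) by a single builtin min over all indices with the composite lexicographic key (value, pair_sum, -index), which encodes the whole selection including the rightmost tie-break in one key.
-- outside the precondition, e.g. on min_with_min_neighbor([]): A raises ValueError, B raises ValueError; on min_with_min_neighbor([1]): A raises IndexError, B raises IndexError
import Mathlib
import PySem

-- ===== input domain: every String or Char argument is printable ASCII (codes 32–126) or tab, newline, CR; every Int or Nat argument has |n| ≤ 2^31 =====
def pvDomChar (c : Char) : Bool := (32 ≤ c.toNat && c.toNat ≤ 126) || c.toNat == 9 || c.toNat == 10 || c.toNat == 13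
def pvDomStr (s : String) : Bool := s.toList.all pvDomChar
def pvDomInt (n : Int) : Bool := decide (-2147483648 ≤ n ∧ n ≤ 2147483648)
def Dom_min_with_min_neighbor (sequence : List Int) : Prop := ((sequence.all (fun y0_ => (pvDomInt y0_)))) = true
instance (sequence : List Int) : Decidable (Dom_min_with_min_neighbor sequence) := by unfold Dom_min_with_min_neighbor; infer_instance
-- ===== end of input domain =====

-- B replaces A's staged findall/min pipeline by one builtin min over all indices with the
-- composite lexicographic key (value, pair_sum, -index); equal returns proved for length ≥ 2.

-- ===== PORT A =====
def pvFindall (sequence : List Int) (val : Int) : List Int :=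
  ((PySem.List.enumerate sequence 0).filter (fun p => p.2 == val)).map (fun p => p.1)

def pvNeighbourIdxs (sequence : List Int) (idx : Int) : Option Int × Option Int :=
  let maxIdx : Int := (sequence.length : Int) - 1
  if idx > 0 ∧ idx < maxIdx then (some (idx - 1), some (idx + 1))
  else if idx = 0 then (none, some (idx + 1))
  else if idx = maxIdx then (some (idx - 1), none)
  else (none, none)  -- bare `raise`; unreachable for 0 ≤ idx < len

def pvMinNeighbour (sequence : List Int) (idx : Int) : Int :=
  match pvNeighbourIdxs sequence idx with
  | (none, right) => right.getD 0     -- left is None → return right (right = some _ whenever reached)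
  | (some left, none) => left
  | (some left, some right) =>
      (PySem.List.min? [left, right] (fun x => PySem.List.pyGetD sequence x 0)).getD 0

def pvGetValues (sequence : List Int) (idxs : Int × Int) : List Int :=
  [PySem.List.pyGetD sequence idxs.1 0, PySem.List.pyGetD sequence idxs.2 0]

def min_with_min_neighbor (sequence : List Int) : Int × Int :=
  let minVal := (PySem.List.min? sequence (fun x => x)).getD 0
  let occurences := pvFindall sequence minVal
  let minIdxPairs := occurences.map (fun idx => (idx, pvMinNeighbour sequence idx))
  let pair := minIdxPairs.map (fun idxs => (pvGetValues sequence idxs).sum)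
  let minPair := (PySem.List.min? pair (fun x => x)).getD 0
  let minPairOccurences := pvFindall pair minPair
  PySem.List.pyGetD minIdxPairs (PySem.List.pyGetD minPairOccurences (-1) 0) (0, 0)

-- ===== PORT B =====
-- Source B's local helper neighbour(i)
def pvNeighbour (sequence : List Int) (n i : Int) : Int :=
  if i = 0 then 1
  else if i = n - 1 then i - 1
  else if PySem.List.pyGetD sequence (i - 1) 0 ≤ PySem.List.pyGetD sequence (i + 1) 0 then i - 1
  else i + 1

-- the lambda key of Source B's min call
def pvKey (sequence : List Int) (n i : Int) : Int × Int × Int :=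
  (PySem.List.pyGetD sequence i 0,
   PySem.List.pyGetD sequence i 0 + PySem.List.pyGetD sequence (pvNeighbour sequence n i) 0,
   -i)

-- Python's '<' on int 3-tuples (lexicographic); exact for these keys
def pvKeyLt (a b : Int × Int × Int) : Bool :=
  a.1 < b.1 || (a.1 == b.1 && (a.2.1 < b.2.1 || (a.2.1 == b.2.1 && a.2.2 < b.2.2)))

-- one step of Python's builtin min(..., key=...): keep the first strictly smaller key
def pvMinStep (sequence : List Int) (n : Int)
    (acc : Option (Int × (Int × Int × Int))) (i : Int) : Option (Int × (Int × Int × Int)) :=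
  let k := pvKey sequence n i
  match acc with
  | none => some (i, k)
  | some b => if pvKeyLt k b.2 then some (i, k) else acc

def min_with_min_neighbor_alt (sequence : List Int) : Int × Int :=
  let n : Int := (sequence.length : Int)
  match (PySem.List.pyRange 0 n 1).foldl (pvMinStep sequence n) none with
  | some b => (b.1, pvNeighbour sequence n b.1)
  | none => (0, 0)   -- empty range: Python min raises ValueError; outside Pre_

-- ===== PRECONDITION & SPEC =====
-- Python A raises on lists of length < 2 (ValueError from min([]) on the empty list,
-- IndexError via sequence[1] on a single-element list); Pre_ excludes exactly those.
def Pre_min_with_min_neighbor (sequence : List Int) : Prop := 2 ≤ sequence.length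
instance (sequence : List Int) : Decidable (Pre_min_with_min_neighbor sequence) := by
  unfold Pre_min_with_min_neighbor; infer_instance
def pvWitness_min_with_min_neighbor : List Int := [1, 2]

def Spec_min_with_min_neighbor (sequence : List Int) (out : Int × Int) : Prop :=
  out = min_with_min_neighbor_alt sequence
instance (sequence : List Int) (out : Int × Int) : Decidable (Spec_min_with_min_neighbor sequence out) := by
  unfold Spec_min_with_min_neighbor; infer_instance

-- ===== CLAIM (what is proved, stated in full; the proofs are below) =====
def Claim_equal_min_with_min_neighbor : Prop := ∀ (sequence : List Int), Dom_min_with_min_neighbor sequence → Pre_min_with_min_neighbor sequence → Spec_min_with_min_neighbor sequence (min_with_min_neighbor sequence)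

-- ===== LEMMAS AND PROOFS =====

lemma pvKeyLt_false_of (a1 a2 a3 b1 b2 b3 : Int)
    (h : b1 ≤ a1 ∧ (a1 = b1 → b2 ≤ a2 ∧ (a2 = b2 → b3 ≤ a3))) :
    pvKeyLt (a1, a2, a3) (b1, b2, b3) = false := by
  simp [pvKeyLt]
  omega

lemma pvKeyLt_total (a b : Int × Int × Int)
    (h1 : pvKeyLt a b = false) (h2 : pvKeyLt b a = false) : a = b := by
  obtain ⟨a1, a2, a3⟩ := a; obtain ⟨b1, b2, b3⟩ := b
  simp [pvKeyLt] at h1 h2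
  simp [Prod.ext_iff]
  omega

lemma pvMin?_eq_some_getD (l : List Int) (h : l ≠ []) :
    PySem.List.min? l (fun x => x) = some ((PySem.List.min? l (fun x => x)).getD 0) := by
  cases e : PySem.List.min? l (fun x => x) with
  | none => exact absurd ((PySem.List.min?_eq_none_iff _ _).mp e) h
  | some m => rfl

lemma pvMin_getD_mem (l : List Int) (h : l ≠ []) :
    (PySem.List.min? l (fun x => x)).getD 0 ∈ l := by
  cases e : PySem.List.min? l (fun x => x) with
  | none => exact absurd ((PySem.List.min?_eq_none_iff _ _).mp e) h
  | some m => simpa using PySem.List.min?_mem e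

lemma pvMin_getD_le (l : List Int) (h : l ≠ []) (x : Int) (hx : x ∈ l) :
    (PySem.List.min? l (fun x => x)).getD 0 ≤ x := by
  have := PySem.List.min?_isMin (pvMin?_eq_some_getD l h)
  exact this x hx

lemma pvMem_findall_iff (l : List Int) (v i : Int) :
    i ∈ pvFindall l v ↔ ∃ (k : Nat) (h : k < l.length), i = (k : Int) ∧ l[k] = v := by
  simp only [pvFindall, List.mem_map, List.mem_filter]
  constructor
  · rintro ⟨p, ⟨hpe, hpv⟩, hpi⟩
    rw [PySem.List.mem_enumerate_iff] at hpe
    obtain ⟨k, hk, rfl⟩ := hpe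
    simp at hpv hpi
    exact ⟨k, hk, by omega, hpv⟩
  · rintro ⟨k, hk, rfl, hv⟩
    refine ⟨((k : Int), l[k]), ⟨?_, by simp [hv]⟩, rfl⟩
    rw [PySem.List.mem_enumerate_iff]
    exact ⟨k, hk, by simp⟩

lemma pvFindall_ne_nil (l : List Int) (v : Int) (h : v ∈ l) : pvFindall l v ≠ [] := by
  obtain ⟨k, hk, hv⟩ := List.mem_iff_getElem.mp h
  apply List.ne_nil_of_mem (a := (k : Int))
  exact (pvMem_findall_iff l v _).mpr ⟨k, hk, rfl, hv⟩

lemma pvFindall_pairwise (l : List Int) (v : Int) : (pvFindall l v).Pairwise (· < ·) := by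
  simp only [pvFindall, List.pairwise_map]
  exact (PySem.List.pairwise_lt_enumerate l 0).filter _

lemma pvSorted_le_getLast {L : List Int} (h : L.Pairwise (· < ·)) (hne : L ≠ [])
    (x : Int) (hx : x ∈ L) : x ≤ L.getLast hne := by
  induction L with
  | nil => exact absurd rfl hne
  | cons a t ih =>
    cases t with
    | nil => simp at hx; simp [hx, List.getLast]
    | cons b u =>
      rw [List.getLast_cons (by simp)]
      rcases List.mem_cons.mp hx with rfl | hx'
      · have := (List.pairwise_cons.mp h).1
        have hlast : (b :: u).getLast (by simp) ∈ b :: u := List.getLast_mem _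
        exact le_of_lt (this _ hlast)
      · exact ih (List.pairwise_cons.mp h).2 (by simp) hx'

lemma pvNb_eq (s : List Int) (i : Int) (h2 : 2 ≤ s.length) (h0 : 0 ≤ i)
    (hn : i < (s.length : Int)) :
    pvNeighbour s (s.length : Int) i = pvMinNeighbour s i := by
  unfold pvNeighbour pvMinNeighbour pvNeighbourIdxs
  by_cases hi0 : i = 0
  · subst hi0; simp
  · by_cases hil : i = (s.length : Int) - 1
    · simp [hil, show ¬ ((s.length:Int) - 1 = 0) by omega]
    · simp only [if_neg hi0, if_neg hil,
        if_pos (show i > 0 ∧ i < (s.length:Int) - 1 by omega)]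
      simp only [PySem.List.min?, List.foldl_cons, List.foldl_nil]
      split <;> split <;> simp only [Option.getD_some] <;> omega

-- B's fold returns some index of L whose key no element of L strictly beats
lemma pvKeyLt_irrefl (a : Int × Int × Int) : pvKeyLt a a = false := by
  obtain ⟨a1, a2, a3⟩ := a; simp [pvKeyLt]

lemma pvKeyLt_trans_not (a b c : Int × Int × Int)
    (h1 : pvKeyLt a b = false) (h2 : pvKeyLt c b = true) : pvKeyLt a c = false := by
  obtain ⟨a1, a2, a3⟩ := a; obtain ⟨b1, b2, b3⟩ := b; obtain ⟨c1, c2, c3⟩ := c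
  simp [pvKeyLt] at h1 h2 ⊢
  omega

-- B's fold returns some index of L whose key no element of L strictly beats
lemma pvFold_spec (s : List Int) (n : Int) (L : List Int) (hL : L ≠ []) :
    ∃ r, L.foldl (pvMinStep s n) none = some (r, pvKey s n r) ∧ r ∈ L ∧
      ∀ j ∈ L, pvKeyLt (pvKey s n j) (pvKey s n r) = false := by
  induction L using List.reverseRecOn with
  | nil => exact absurd rfl hL
  | append_singleton L x ih =>
    rw [List.foldl_append]
    by_cases hLnil : L = []
    · subst hLnil
      refine ⟨x, rfl, by simp, ?_⟩
      intro j hj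
      simp at hj; subst hj
      exact pvKeyLt_irrefl _
    · obtain ⟨r, hfold, hmem, hbest⟩ := ih hLnil
      rw [hfold]
      simp only [List.foldl_cons, List.foldl_nil, pvMinStep]
      by_cases hx : pvKeyLt (pvKey s n x) (pvKey s n r) = true
      · refine ⟨x, by simp [hx], by simp, ?_⟩
        intro j hj
        rcases List.mem_append.mp hj with hj' | hj'
        · exact pvKeyLt_trans_not _ _ _ (hbest j hj') hx
        · simp at hj'; subst hj'
          exact pvKeyLt_irrefl _
      · rw [Bool.not_eq_true] at hx
        refine ⟨r, by simp [hx], List.mem_append_left _ hmem, ?_⟩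
        intro j hj
        rcases List.mem_append.mp hj with hj' | hj'
        · exact hbest j hj'
        · simp at hj'; subst hj'; exact hx

-- A's result characterised: it is (i, min_neighbour i) for an occurrence i of the minimum
-- whose pair sum is minimal among occurrences, rightmost among those
lemma pvA_char (s : List Int) (hpre : 2 ≤ s.length) :
    ∃ iA : Int,
      min_with_min_neighbor s = (iA, pvMinNeighbour s iA) ∧
      iA ∈ pvFindall s ((PySem.List.min? s (fun x => x)).getD 0) ∧
      (∀ j ∈ pvFindall s ((PySem.List.min? s (fun x => x)).getD 0),
        PySem.List.pyGetD s iA 0 + PySem.List.pyGetD s (pvMinNeighbour s iA) 0 ≤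
        PySem.List.pyGetD s j 0 + PySem.List.pyGetD s (pvMinNeighbour s j) 0) ∧
      (∀ j ∈ pvFindall s ((PySem.List.min? s (fun x => x)).getD 0),
        PySem.List.pyGetD s j 0 + PySem.List.pyGetD s (pvMinNeighbour s j) 0 =
        PySem.List.pyGetD s iA 0 + PySem.List.pyGetD s (pvMinNeighbour s iA) 0 → j ≤ iA) := by
  unfold min_with_min_neighbor
  have hsne : s ≠ [] := by intro h; subst h; simp at hpre
  set mv := (PySem.List.min? s (fun x => x)).getD 0 with hmv
  set occ := pvFindall s mv with hocc
  have hoccne : occ ≠ [] := pvFindall_ne_nil _ _ (pvMin_getD_mem _ hsne)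
  set f : Int → Int := fun i => PySem.List.pyGetD s i 0 + PySem.List.pyGetD s (pvMinNeighbour s i) 0 with hf
  have hsums : (occ.map (fun idx => (idx, pvMinNeighbour s idx))).map
      (fun idxs => (pvGetValues s idxs).sum) = occ.map f := by
    simp [List.map_map, pvGetValues, hf]
  have hsumsne : occ.map f ≠ [] := by simpa using hoccne
  set minS := (PySem.List.min? (occ.map f) (fun x => x)).getD 0 with hminS
  set fo := pvFindall (occ.map f) minS with hfo
  have hfone : fo ≠ [] := pvFindall_ne_nil _ _ (pvMin_getD_mem _ hsumsne)
  obtain ⟨k, hk, hlast, hsk⟩ := (pvMem_findall_iff _ _ _).mp (List.getLast_mem hfone)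
  rw [List.length_map] at hk
  rw [List.getElem_map] at hsk
  refine ⟨occ[k], ?_, List.getElem_mem hk, ?_, ?_⟩
  · -- A's computation reaches the pair at position k
    show (let minVal := (PySem.List.min? s (fun x => x)).getD 0
          let occurences := pvFindall s minVal
          let minIdxPairs := occurences.map (fun idx => (idx, pvMinNeighbour s idx))
          let pair := minIdxPairs.map (fun idxs => (pvGetValues s idxs).sum)
          let minPair := (PySem.List.min? pair (fun x => x)).getD 0
          let minPairOccurences := pvFindall pair minPair
          PySem.List.pyGetD minIdxPairs (PySem.List.pyGetD minPairOccurences (-1) 0) (0, 0))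
        = (occ[k], pvMinNeighbour s occ[k])
    simp only [← hmv, ← hocc, hsums, ← hminS, ← hfo]
    rw [PySem.List.pyGetD_neg_one _ _ hfone, hlast, PySem.List.pyGetD_natCast,
      List.getD_eq_getElem?_getD, List.getElem?_eq_getElem (by simpa using hk)]
    simp
  · intro j hj
    have hfjmem : f j ∈ occ.map f := List.mem_map_of_mem hj
    have h1 : minS ≤ f j := pvMin_getD_le _ hsumsne _ hfjmem
    have h2 : f occ[k] = minS := hsk
    calc PySem.List.pyGetD s occ[k] 0 + PySem.List.pyGetD s (pvMinNeighbour s occ[k]) 0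
        = f occ[k] := rfl
      _ = minS := h2
      _ ≤ f j := h1
  · intro j hj hje
    obtain ⟨t, ht, hto⟩ := List.mem_iff_getElem.mp hj
    have hst : (occ.map f)[t]'(by simpa using ht) = minS := by
      rw [List.getElem_map, hto]
      calc f j = f occ[k] := hje
        _ = minS := hsk
    have htfo : (t : Int) ∈ fo :=
      (pvMem_findall_iff _ _ _).mpr ⟨t, by simpa using ht, rfl, hst⟩
    have htk : (t : Int) ≤ (k : Int) := by
      rw [← hlast]
      exact pvSorted_le_getLast (pvFindall_pairwise (occ.map f) minS) hfone _ htfo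
    have hocc_pair := List.pairwise_iff_getElem.mp (pvFindall_pairwise s mv)
    rcases Nat.lt_or_ge t k with hlt | hge
    · exact le_of_lt (hto ▸ hocc_pair t k ht hk hlt)
    · have : t = k := by omega
      subst this
      exact le_of_eq hto.symm

theorem min_with_min_neighbor_equal (s : List Int) (hpre : 2 ≤ s.length) :
    min_with_min_neighbor s = min_with_min_neighbor_alt s := by
  have hsne : s ≠ [] := by intro h; subst h; simp at hpre
  set n : Int := (s.length : Int) with hn
  set mv := (PySem.List.min? s (fun x => x)).getD 0 with hmv
  obtain ⟨iA, hA, hiAocc, hminsum, hright⟩ := pvA_char s hpre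
  obtain ⟨kA, hkA, hiAk, hskA⟩ := (pvMem_findall_iff _ _ _).mp hiAocc
  have hiA0 : 0 ≤ iA := by omega
  have hiAn : iA < n := by omega
  have hgiA : PySem.List.pyGetD s iA 0 = mv := by
    rw [hiAk, PySem.List.pyGetD_natCast, List.getD_eq_getElem?_getD,
      List.getElem?_eq_getElem hkA, Option.getD_some, hskA]
  -- no index's key lexicographically beats iA's key
  have hkey : ∀ jx : Int, 0 ≤ jx → jx < n →
      pvKeyLt (pvKey s n jx) (pvKey s n iA) = false := by
    intro jx hj0 hjn
    have hkx : jx = ((jx.toNat : Nat) : Int) := by omega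
    have hkxlt : jx.toNat < s.length := by omega
    have hgjx : PySem.List.pyGetD s jx 0 = s[jx.toNat] :=
      PySem.List.pyGetD_eq_getElem _ _ hj0 (by omega)
    have hmvle : mv ≤ PySem.List.pyGetD s jx 0 := by
      rw [hgjx]; exact pvMin_getD_le s hsne _ (List.getElem_mem hkxlt)
    have hnbj : pvNeighbour s n jx = pvMinNeighbour s jx := pvNb_eq s jx hpre hj0 hjn
    have hnbA : pvNeighbour s n iA = pvMinNeighbour s iA := pvNb_eq s iA hpre hiA0 hiAn
    by_cases hc : PySem.List.pyGetD s jx 0 = mv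
    · have hjocc : jx ∈ pvFindall s mv :=
        (pvMem_findall_iff _ _ _).mpr ⟨jx.toNat, hkxlt, hkx, by rw [← hgjx, hc]⟩
      have h1 := hminsum jx hjocc
      have h2 := hright jx hjocc
      simp only [pvKey, hnbj, hnbA]
      exact pvKeyLt_false_of _ _ _ _ _ _
        ⟨by omega, fun _ => ⟨h1, fun hs => by have := h2 hs; omega⟩⟩
    · simp only [pvKey, hnbj, hnbA]
      exact pvKeyLt_false_of _ _ _ _ _ _ ⟨by omega, fun he => (hc (by omega)).elim⟩
  -- B's fold lands on iA
  have hrange_len : (PySem.List.pyRange 0 n 1).length = s.length := by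
    rw [PySem.List.length_pyRange_one]; omega
  have hrangene : PySem.List.pyRange 0 n 1 ≠ [] :=
    List.ne_nil_of_length_pos (by omega)
  obtain ⟨r, hfold, hrm, hbest⟩ := pvFold_spec s n _ hrangene
  have hr := (PySem.List.mem_pyRange_one).mp hrm
  have h1 : pvKeyLt (pvKey s n iA) (pvKey s n r) = false :=
    hbest iA ((PySem.List.mem_pyRange_one).mpr ⟨hiA0, hiAn⟩)
  have h2 : pvKeyLt (pvKey s n r) (pvKey s n iA) = false := hkey r hr.1 hr.2
  have hkeq : pvKey s n r = pvKey s n iA := pvKeyLt_total _ _ h2 h1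
  have hriA : r = iA := by
    have := congrArg (fun t : Int × Int × Int => t.2.2) hkeq
    simp only [pvKey] at this
    omega
  rw [hA]
  show _ = (let nn : Int := (s.length : Int)
    match (PySem.List.pyRange 0 nn 1).foldl (pvMinStep s nn) none with
    | some b => (b.1, pvNeighbour s nn b.1)
    | none => (0, 0))
  simp only [← hn, hfold, hriA]
  rw [pvNb_eq s iA hpre hiA0 hiAn]

-- ===== VERDICT (by name: the statement is the Claim_ definition above) =====
theorem min_with_min_neighbor_spec : Claim_equal_min_with_min_neighbor := by
  intro s _ hpre
  unfold Spec_min_with_min_neighbor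
  exact min_with_min_neighbor_equal s hpre
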